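-- pv_equiv track=rewrite | github.com/seoul-ssafy-class-2-studyclub/hyeonhwa | D4/4366. 정식이의 은행 업무.py | c2
-- ===== SOURCE A (Python) =====
-- def change2(x):
--     res = 0
--     j = 1
--     for i in range(len(x)-1, -1, -1):
--         res += x[i] * j
--         j *= 2
--     return res
--
-- def c2(x):
--     res2 = []
--     for i in range(len(x)):
--         if x[i] == 1:
--             x[i] = 0
--             rex = change2(x)
--             res2.append(rex)
--             x[i] = 1
--         else:
--             x[i] = 1
--             rex = change2(x)
--             res2.append(rex)
--             x[i] = 0
--     return res2
-- ===== SOURCE B (Python) =====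
-- def c2(x):
--     # One pass: keep the running decimal value `cur` of the list as A's loop
--     # would see it (entries already processed settle to 1 if they were 1, else 0),
--     # and the weight p = 2**(n-1-i); each answer is cur adjusted at one bit.
--     n = len(x)
--     base = 0
--     for v in x:
--         base = base * 2 + v
--     p = 1 << (n - 1) if n else 0
--     cur = base
--     res = []
--     for v in x:
--         if v == 1:
--             res.append(cur - p)
--         else:
--             cur -= v * p
--             res.append(cur + p)
--         p >>= 1
--     return res
-- ===== Notes on version B (the rewrite author's own statement) =====
-- stated objective: faster
-- what changed: Instead of recomputing the whole decimal value with change2 for every flipped position (O(n^2)), B computes the decimal value once and produces each answer in O(1) by adjusting a running value with the current bit weight 2^(n-1-i).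
import Mathlib
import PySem

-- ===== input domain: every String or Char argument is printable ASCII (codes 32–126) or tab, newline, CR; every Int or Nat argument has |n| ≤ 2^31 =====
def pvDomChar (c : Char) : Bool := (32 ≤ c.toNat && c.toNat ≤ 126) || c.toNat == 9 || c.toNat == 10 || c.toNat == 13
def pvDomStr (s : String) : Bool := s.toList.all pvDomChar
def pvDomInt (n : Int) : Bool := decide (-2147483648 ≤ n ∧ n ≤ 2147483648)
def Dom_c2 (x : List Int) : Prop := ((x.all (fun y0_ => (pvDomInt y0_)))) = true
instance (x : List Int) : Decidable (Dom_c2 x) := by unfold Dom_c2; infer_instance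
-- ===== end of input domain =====

-- B replaces A's per-position recomputation of the whole decimal value by a single
-- pass with a running value and bit weight (O(n) instead of O(n^2)); equivalence is
-- about the RETURN value: A mutates its argument in place (entries settle to 0/1), B does not.

-- ===== PORT A =====
-- change2: res = 0; j = 1; for i in range(len(x)-1, -1, -1): res += x[i]*j; j *= 2
def change2 (x : List Int) : Int :=
  ((PySem.List.pyRange ((x.length : Int) - 1) (-1) (-1)).foldl
    (fun (s : Int × Int) i => (s.1 + PySem.List.pyGetD x i 0 * s.2, s.2 * 2)) (0, 1)).1

-- c2: for i in range(len(x)): flip x[i], append change2(x), write the flipped-back value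
def c2 (x : List Int) : List Int :=
  ((PySem.List.pyRange 0 (x.length : Int) 1).foldl
    (fun (s : List Int × List Int) i =>
      if PySem.List.pyGetD s.1 i 0 = 1 then
        let xs' := s.1.set i.toNat 0
        (xs'.set i.toNat 1, s.2 ++ [change2 xs'])
      else
        let xs' := s.1.set i.toNat 1
        (xs'.set i.toNat 0, s.2 ++ [change2 xs'])) (x, [])).2

-- ===== PORT B =====
def c2_alt (x : List Int) : List Int :=
  let n := x.length
  let base := x.foldl (fun a v => a * 2 + v) 0
  let p : Int := if n = 0 then 0 else 2 ^ (n - 1)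
  ((x.foldl (fun (s : List Int × Int × Int) v =>
      if v = 1 then (s.1 ++ [s.2.1 - s.2.2], s.2.1, s.2.2 / 2)
      else
        let cur' := s.2.1 - v * s.2.2
        (s.1 ++ [cur' + s.2.2], cur', s.2.2 / 2)) ([], base, p))).1

-- ===== PRECONDITION & SPEC =====
def Spec_c2 (x : List Int) (out : List Int) : Prop := out = c2_alt x
instance (x : List Int) (out : List Int) : Decidable (Spec_c2 x out) := by unfold Spec_c2; infer_instance

-- ===== CLAIM (what is proved, stated in full; the proofs are below) =====
def Claim_equal_c2 : Prop := ∀ (x : List Int), Dom_c2 x → Spec_c2 x (c2 x)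

-- ===== LEMMAS AND PROOFS =====

-- Horner value of the list with accumulator a
def pvH (a : Int) (l : List Int) : Int := l.foldl (fun a v => a * 2 + v) a

-- the common answer list: element for bit v with weight 2^m, running value cur
def pvG (cur : Int) (l : List Int) (m : Nat) : List Int :=
  match l with
  | [] => []
  | v :: t =>
    if v = 1 then (cur - 2 ^ m) :: pvG cur t (m - 1)
    else (cur - v * 2 ^ m + 2 ^ m) :: pvG (cur - v * 2 ^ m) t (m - 1)

theorem pvH_shift (l : List Int) : ∀ a d, pvH (a + d) l = pvH a l + d * 2 ^ l.length := by
  induction l with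
  | nil => intro a d; simp [pvH]
  | cons v t ih =>
    intro a d
    simp only [pvH, List.foldl_cons, List.length_cons]
    have h : (a + d) * 2 + v = (a * 2 + v) + (d * 2) := by ring
    rw [h]
    have := ih (a * 2 + v) (d * 2)
    simp only [pvH] at this
    rw [this]; ring

theorem change2_eq_pvH (x : List Int) : change2 x = pvH 0 x := by
  have hrev : PySem.List.pyRange ((x.length : Int) - 1) (-1) (-1)
      = (PySem.List.pyRange 0 (x.length : Int) 1).reverse := by
    have := PySem.List.pyRange_neg_one_eq_reverse ((x.length : Int) - 1) (-1)
    simpa using this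
  unfold change2
  rw [hrev, List.foldl_reverse]
  have hmap : (PySem.List.pyRange 0 (x.length : Int) 1).map (fun i => PySem.List.pyGetD x i 0) = x := by
    simpa using PySem.List.map_pyGetD_pyRange_zero x 0
  have hfr : ∀ (l : List Int),
      l.foldr (fun v (s : Int × Int) => (s.1 + v * s.2, s.2 * 2)) (0, 1) = (pvH 0 l, 2 ^ l.length) := by
    intro l
    induction l with
    | nil => simp [pvH]
    | cons v t ih =>
      simp only [List.foldr_cons, ih, List.length_cons]
      have : pvH 0 (v :: t) = pvH 0 t + v * 2 ^ t.length := by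
        have := pvH_shift t 0 v
        simp only [pvH, List.foldl_cons] at *
        simpa using this
      rw [this]
      refine Prod.ext ?_ ?_
      · simp
      · simp; ring
  calc ((PySem.List.pyRange 0 (x.length : Int) 1).foldr
          (fun i (s : Int × Int) => (s.1 + PySem.List.pyGetD x i 0 * s.2, s.2 * 2)) (0, 1)).1
      = (((PySem.List.pyRange 0 (x.length : Int) 1).map (fun i => PySem.List.pyGetD x i 0)).foldr
          (fun v (s : Int × Int) => (s.1 + v * s.2, s.2 * 2)) (0, 1)).1 := by
        rw [List.foldr_map]
    _ = (x.foldr (fun v (s : Int × Int) => (s.1 + v * s.2, s.2 * 2)) (0, 1)).1 := by rw [hmap]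
    _ = pvH 0 x := by rw [hfr]

theorem pvH_set (l : List Int) : ∀ (i : Nat) (b a : Int) (h : i < l.length),
    pvH a (l.set i b) = pvH a l + (b - l[i]) * 2 ^ (l.length - 1 - i) := by
  induction l with
  | nil => intro i b a h; simp at h
  | cons v t ih =>
    intro i b a h
    cases i with
    | zero =>
      simp only [List.set_cons_zero, pvH, List.foldl_cons, List.length_cons, List.getElem_cons_zero,
        Nat.add_sub_cancel, Nat.sub_zero]
      have h2 : a * 2 + b = (a * 2 + v) + (b - v) := by ring
      rw [h2]
      have := pvH_shift t (a * 2 + v) (b - v)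
      simp only [pvH] at this ⊢
      rw [this]
    | succ i =>
      simp only [List.set_cons_succ, pvH, List.foldl_cons, List.length_cons, List.getElem_cons_succ]
      have hi : i < t.length := by simpa using h
      have := ih i b (a * 2 + v) hi
      simp only [pvH] at this
      rw [this]
      have hexp : t.length + 1 - 1 - (i + 1) = t.length - 1 - i := by omega
      rw [hexp]

-- B's loop computes pvG
theorem bloop (l : List Int) : ∀ (res : List Int) (cur : Int) (m : Nat), l.length ≤ m + 1 →
    ((l.foldl (fun (s : List Int × Int × Int) v =>
      if v = 1 then (s.1 ++ [s.2.1 - s.2.2], s.2.1, s.2.2 / 2)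
      else
        let cur' := s.2.1 - v * s.2.2
        (s.1 ++ [cur' + s.2.2], cur', s.2.2 / 2)) (res, cur, (2 : Int) ^ m))).1
    = res ++ pvG cur l m := by
  induction l with
  | nil => intro res cur m _; simp [pvG]
  | cons v t ih =>
    intro res cur m hm
    cases m with
    | zero =>
      have ht : t = [] := by
        cases t with
        | nil => rfl
        | cons a b => simp at hm
      subst ht
      simp only [List.foldl_cons, List.foldl_nil, pvG]
      split_ifs <;> simp
    | succ m =>
      have hdiv : (2 : Int) ^ (m + 1) / 2 = 2 ^ m := by
        rw [pow_succ]
        exact Int.mul_ediv_cancel _ (by norm_num)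
      simp only [List.foldl_cons]
      split_ifs with hv
      · simp only [hdiv, ih _ _ m (by simpa using hm), pvG, hv, if_pos]
        simp
      · simp only [hdiv, ih _ _ m (by simpa using hm), pvG, if_neg hv]
        simp

-- A's loop, from position a onwards over any same-length list y, computes pvG
theorem aloop : ∀ (k : Nat) (y : List Int) (acc : List Int) (a : Nat), a + k = y.length →
    ((PySem.List.pyRange (a : Int) (y.length : Int) 1).foldl
      (fun (s : List Int × List Int) i =>
        if PySem.List.pyGetD s.1 i 0 = 1 then
          let xs' := s.1.set i.toNat 0
          (xs'.set i.toNat 1, s.2 ++ [change2 xs'])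
        else
          let xs' := s.1.set i.toNat 1
          (xs'.set i.toNat 0, s.2 ++ [change2 xs'])) (y, acc)).2
    = acc ++ pvG (pvH 0 y) (y.drop a) (y.length - 1 - a) := by
  intro k
  induction k with
  | zero =>
    intro y acc a ha
    have : a = y.length := by omega
    subst this
    rw [PySem.List.pyRange_one_eq_nil (le_refl _)]
    simp [pvG]
  | succ k ih =>
    intro y acc a ha
    have hlt : a < y.length := by omega
    have hcons := PySem.List.pyRange_one_cons (a := (a : Int)) (b := (y.length : Int))
      (by exact_mod_cast hlt)
    rw [hcons]
    simp only [List.foldl_cons]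
    have hget : PySem.List.pyGetD y (a : Int) 0 = y[a] := by
      rw [PySem.List.pyGetD_eq_getElem y 0 (Int.natCast_nonneg a) (by exact_mod_cast hlt)]
      simp
    have htoNat : ((a : Int)).toNat = a := Int.toNat_natCast a
    have hdropa : y.drop a = y[a] :: y.drop (a + 1) := List.drop_eq_getElem_cons hlt
    have hm : y.length - 1 - a - 1 = y.length - 1 - (a + 1) := by omega
    by_cases hv : y[a] = 1
    · rw [if_pos (by rw [hget]; exact_mod_cast hv)]
      simp only [htoNat]
      have hrestore : (y.set a 0).set a 1 = y := by
        rw [List.set_set]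
        conv_rhs => rw [← List.set_getElem_self hlt]
        rw [hv]
      rw [hrestore]
      have hcast : ((a : Int) + 1) = ((a + 1 : Nat) : Int) := by push_cast; ring
      rw [hcast, ih y (acc ++ [change2 (y.set a 0)]) (a + 1) (by omega)]
      rw [change2_eq_pvH, pvH_set y a 0 0 hlt, hv]
      rw [hdropa]
      conv_rhs => rw [pvG]
      rw [if_pos hv, hm]
      simp; ring_nf
    · rw [if_neg (by rw [hget]; exact_mod_cast hv)]
      simp only [htoNat]
      rw [List.set_set]
      have hcast : ((a : Int) + 1) = ((a + 1 : Nat) : Int) := by push_cast; ring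
      have hlen0 : (y.set a 0).length = y.length := by simp
      rw [hcast]
      have := ih (y.set a 0) (acc ++ [change2 (y.set a 1)]) (a + 1) (by simp; omega)
      rw [hlen0] at this
      rw [this]
      rw [change2_eq_pvH, pvH_set y a 1 0 hlt, pvH_set y a 0 0 hlt]
      have hdrop0 : (y.set a 0).drop (a + 1) = y.drop (a + 1) := by
        rw [List.drop_set, if_pos (by omega)]
      rw [hdrop0, hdropa]
      conv_rhs => rw [pvG]
      rw [if_neg hv, hm]
      simp only [List.append_assoc, List.singleton_append]
      congr 2
      · ring
      · congr 1; ring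

-- unfold c2_alt's let-bindings (definitional)
theorem c2_alt_eq (x : List Int) : c2_alt x =
    ((x.foldl (fun (s : List Int × Int × Int) v =>
      if v = 1 then (s.1 ++ [s.2.1 - s.2.2], s.2.1, s.2.2 / 2)
      else
        let cur' := s.2.1 - v * s.2.2
        (s.1 ++ [cur' + s.2.2], cur', s.2.2 / 2))
      ([], x.foldl (fun a v => a * 2 + v) 0,
       if x.length = 0 then (0 : Int) else 2 ^ (x.length - 1)))).1 := rfl

-- ===== VERDICT (by name: the statement is the Claim_ definition above) =====
theorem c2_spec : Claim_equal_c2 := by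
  intro x _
  unfold Spec_c2
  rw [c2_alt_eq]
  cases x with
  | nil => simp [c2]
  | cons v t =>
    unfold c2
    have hA := aloop (v :: t).length (v :: t) [] 0 (by omega)
    simp only [Nat.cast_zero] at hA
    rw [hA]
    rw [if_neg (by simp)]
    have hB := bloop (v :: t) [] ((v :: t).foldl (fun a v => a * 2 + v) 0) ((v :: t).length - 1)
      (by simp)
    rw [hB]
    simp [pvH]
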